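-- pv_equiv track=rewrite | github.com/VictorRielly/minseps | allFlowers.py | rottoredgap
-- ===== SOURCE A (Python) =====
-- def rottoredgap(inputList):
-- 	newList = inputList[:];
-- 	temp = [];
-- 	for i in range(0,len(newList)):
-- 		if (newList[i] != -1):
-- 			for j in range(i+1,len(newList)):
-- 				if (newList[j] == newList[i]):
-- 					temp.append(j - i);
-- 					newList[j] = -1;
-- 					newList[i] = -1;
-- 					break;
-- 	# print temp;
-- 	return temp;
-- ===== SOURCE B (Python) =====
-- def rottoredgap(inputList):
--     # Non-destructive closed form: position i starts a pair exactly when its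
--     # value's occurrence count up to i is odd and the value occurs again later;
--     # the gap is the distance to the next occurrence.
--     result = []
--     for i, v in enumerate(inputList):
--         if v != -1 and inputList[:i + 1].count(v) % 2 == 1:
--             rest = inputList[i + 1:]
--             if v in rest:
--                 result.append(rest.index(v) + 1)
--     return result
-- ===== Notes on version B (the rewrite author's own statement) =====
-- stated objective: simpler
-- what changed: Replaces A's destructive marking with -1 sentinels and nested rescans by a non-destructive closed form: a position starts a pair iff its value's occurrence count up to that position is odd and the value recurs later, the gap being the distance to the next occurrence.
import Mathlib
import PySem

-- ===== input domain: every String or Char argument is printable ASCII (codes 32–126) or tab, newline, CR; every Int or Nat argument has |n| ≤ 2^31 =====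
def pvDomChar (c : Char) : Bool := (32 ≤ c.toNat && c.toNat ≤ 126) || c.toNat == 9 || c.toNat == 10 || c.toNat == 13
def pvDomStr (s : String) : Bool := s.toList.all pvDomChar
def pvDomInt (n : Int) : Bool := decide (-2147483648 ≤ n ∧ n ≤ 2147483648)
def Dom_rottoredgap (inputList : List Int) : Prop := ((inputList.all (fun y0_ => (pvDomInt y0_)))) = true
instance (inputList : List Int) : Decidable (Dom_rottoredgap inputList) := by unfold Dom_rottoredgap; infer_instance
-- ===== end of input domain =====

-- B replaces A's destructive -1-marking with a non-destructive occurrence-parity closed form; objective: simpler.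

-- ===== PORT A =====
-- inner loop of A: first index j' ≥ j with newList[j'] == v (break on first match)
def rtgFindJ (nl : List Int) (v : Int) (j : Nat) : Option Nat :=
  if h : j < nl.length then
    if nl.getD j 0 = v then some j else rtgFindJ nl v (j + 1)
  else none
termination_by nl.length - j

-- one iteration of A's outer loop over index i, state = (newList, temp)
def rtgStepA (st : List Int × List Int) (i : Nat) : List Int × List Int :=
  if st.1.getD i 0 ≠ -1 then
    match rtgFindJ st.1 (st.1.getD i 0) (i + 1) with
    | some j => ((st.1.set j (-1)).set i (-1), st.2 ++ [(j : Int) - (i : Int)])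
    | none => st
  else st

def rottoredgap (inputList : List Int) : List Int :=
  ((List.range inputList.length).foldl rtgStepA (inputList, [])).2

-- ===== PORT B =====
-- one iteration of B's loop: append rest.index(v)+1 when the prefix count of v is odd and v recurs
def rtgStepB (l : List Int) (res : List Int) (i : Nat) : List Int :=
  let v := l.getD i 0
  if v ≠ -1 ∧ (l.take (i + 1)).count v % 2 = 1 then
    let rest := l.drop (i + 1)
    if v ∈ rest then
      match PySem.List.index? rest v with
      | some k => res ++ [(k : Int) + 1]
      | none => res
    else res
  else res

def rottoredgap_alt (inputList : List Int) : List Int :=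
  (List.range inputList.length).foldl (rtgStepB inputList) []

-- ===== PRECONDITION & SPEC =====
def Spec_rottoredgap (inputList : List Int) (out : List Int) : Prop := out = rottoredgap_alt inputList
instance (inputList : List Int) (out : List Int) : Decidable (Spec_rottoredgap inputList out) := by unfold Spec_rottoredgap; infer_instance

-- ===== CLAIM (what is proved, stated in full; the proofs are below) =====
def Claim_equal_rottoredgap : Prop := ∀ (inputList : List Int), Dom_rottoredgap inputList → Spec_rottoredgap inputList (rottoredgap inputList)

-- ===== LEMMAS AND PROOFS =====

def rtgV (l : List Int) (k : Nat) : Int := l.getD k 0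

def rtgStart (l : List Int) (k : Nat) : Prop :=
  rtgV l k ≠ -1 ∧ (l.take (k + 1)).count (rtgV l k) % 2 = 1 ∧ rtgV l k ∈ l.drop (k + 1)

def rtgPartner (l : List Int) (k : Nat) : Nat :=
  k + 1 + ((PySem.List.index? (l.drop (k + 1)) (rtgV l k)).getD 0)

def rtgDead (l : List Int) (i k : Nat) : Prop :=
  rtgV l k = -1 ∨ (rtgStart l k ∧ k < i) ∨ (∃ s, s < i ∧ rtgStart l s ∧ rtgPartner l s = k)

def rtgInv (l : List Int) (i : Nat) (st : List Int × List Int) : Prop :=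
  st.1.length = l.length ∧
  (∀ k, k < l.length →
    (rtgDead l i k → st.1.getD k 0 = -1) ∧ (¬ rtgDead l i k → st.1.getD k 0 = l.getD k 0)) ∧
  st.2 = (List.range i).foldl (rtgStepB l) []

-- index? from an explicit first-occurrence description
theorem rtg_index?_eq_some_of {xs : List Int} {v : Int} {m : Nat} (hm : m < xs.length)
    (hv : xs[m] = v) (hlt : ∀ j (hj : j < m), xs[j]'(by omega) ≠ v) :
    PySem.List.index? xs v = some m := by
  rw [PySem.List.index?_eq_some_iff]
  refine ⟨xs.take m, xs.drop (m + 1), ?_, by simp [hm.le], ?_⟩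
  · conv_lhs => rw [← List.take_append_drop m xs]
    rw [← List.getElem_cons_drop hm, hv]
  · intro hmem
    obtain ⟨j, hj, hjv⟩ := List.mem_iff_getElem.1 hmem
    have hjm : j < m := by simp [List.length_take] at hj; omega
    exact hlt j hjm (by simpa [List.getElem_take] using hjv)

-- basic facts about the partner of a start position
theorem rtg_partner_spec {l : List Int} {k : Nat} (h : rtgStart l k) :
    k < rtgPartner l k ∧ rtgPartner l k < l.length ∧ rtgV l (rtgPartner l k) = rtgV l k ∧
      ∀ j, k < j → j < rtgPartner l k → rtgV l j ≠ rtgV l k := by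
  obtain ⟨hv, hodd, hmem⟩ := h
  cases h' : PySem.List.index? (l.drop (k + 1)) (rtgV l k) with
  | none => exact absurd ((PySem.List.index?_eq_none_iff _ _).mp h') (by simpa using hmem)
  | some k0 =>
    obtain ⟨hk0len, hvk0, hlt⟩ := PySem.List.getElem_of_index?_eq_some h'
    have hdlen : (l.drop (k + 1)).length = l.length - (k + 1) := List.length_drop
    have hpk : rtgPartner l k = k + 1 + k0 := by unfold rtgPartner; rw [h']; rfl
    have hlen2 : k + 1 + k0 < l.length := by omega
    refine ⟨by omega, by omega, ?_, ?_⟩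
    · show l.getD (rtgPartner l k) 0 = rtgV l k
      rw [hpk, List.getD_eq_getElem _ _ hlen2]
      rw [List.getElem_drop] at hvk0
      exact hvk0
    · intro j hj1 hj2
      rw [hpk] at hj2
      have hjlen : j < l.length := by omega
      have hm : j - (k + 1) < k0 := by omega
      have hne := hlt (j - (k + 1)) hm
      rw [List.getElem_drop] at hne
      show l.getD j 0 ≠ rtgV l k
      rw [List.getD_eq_getElem _ _ hjlen]
      simpa only [show k + 1 + (j - (k + 1)) = j from by omega] using hne

-- the partner position has even prefix parity
theorem rtg_count_partner {l : List Int} {k : Nat} (h : rtgStart l k) :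
    (l.take (rtgPartner l k + 1)).count (rtgV l k) % 2 = 0 := by
  obtain ⟨hv, hodd, hmem⟩ := h
  cases h' : PySem.List.index? (l.drop (k + 1)) (rtgV l k) with
  | none => exact absurd ((PySem.List.index?_eq_none_iff _ _).mp h') (by simpa using hmem)
  | some k0 =>
    obtain ⟨hk0len, hvk0, hlt⟩ := PySem.List.getElem_of_index?_eq_some h'
    have hpk : rtgPartner l k = k + 1 + k0 := by unfold rtgPartner; rw [h']; rfl
    rw [hpk, show k + 1 + k0 + 1 = (k + 1) + (k0 + 1) from by omega, List.take_add,
      List.count_append]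
    have h1 : ((l.drop (k + 1)).take (k0 + 1)).count (rtgV l k) = 1 := by
      rw [List.take_add_one, List.count_append, List.getElem?_eq_getElem hk0len]
      have hz : ((l.drop (k + 1)).take k0).count (rtgV l k) = 0 := by
        rw [List.count_eq_zero]
        intro hmemt
        obtain ⟨j, hj, hjv⟩ := List.mem_iff_getElem.1 hmemt
        have hjk0 : j < k0 := by simp [List.length_take] at hj; omega
        exact hlt j hjk0 (by simpa [List.getElem_take] using hjv)
      simp [hz, hvk0]
    omega

theorem rtg_partner_inj {l : List Int} {s s' : Nat} (hs : rtgStart l s) (hs' : rtgStart l s')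
    (h : rtgPartner l s = rtgPartner l s') : s = s' := by
  have key : ∀ a b, rtgStart l a → rtgStart l b → rtgPartner l a = rtgPartner l b →
      a < b → False := by
    intro a b ha hb hab hlt
    obtain ⟨ha1, ha2, ha3, ha4⟩ := rtg_partner_spec ha
    obtain ⟨hb1, hb2, hb3, hb4⟩ := rtg_partner_spec hb
    have hveq : rtgV l b = rtgV l a := by
      rw [← hb3, ← hab, ha3]
    exact ha4 b hlt (by omega) hveq
  rcases Nat.lt_trichotomy s s' with h1 | h1 | h1
  · exact absurd (key s s' hs hs' h h1) id
  · exact h1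
  · exact absurd (key s' s hs' hs h.symm h1) id

-- a last occurrence before k exists when v occurs in l.take k
theorem rtg_last_occ {l : List Int} {v : Int} : ∀ k, k ≤ l.length → v ∈ l.take k →
    ∃ s, s < k ∧ l.getD s 0 = v ∧ ∀ j, s < j → j < k → l.getD j 0 ≠ v := by
  intro k
  induction k with
  | zero => intro _ h; simp at h
  | succ k ih =>
    intro hk hmem
    by_cases hv : l.getD k 0 = v
    · exact ⟨k, by omega, hv, fun j hj1 hj2 => absurd hj1 (by omega)⟩
    · have hklen : k < l.length := by omega
      have hmem' : v ∈ l.take k := by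
        rw [List.take_add_one, List.getElem?_eq_getElem hklen] at hmem
        rcases List.mem_append.1 hmem with h | h
        · exact h
        · exfalso
          apply hv
          rw [List.getD_eq_getElem _ _ hklen]
          simp at h
          exact h.symm
      obtain ⟨s, hs1, hs2, hs3⟩ := ih (by omega) hmem'
      refine ⟨s, by omega, hs2, fun j hj1 hj2 => ?_⟩
      rcases (by omega : j < k ∨ j = k) with hc | hc
      · exact hs3 j hj1 hc
      · subst hc; exact hv

-- even-parity positions are partners of an earlier start
theorem rtg_even_prev {l : List Int} {k : Nat} (hv : rtgV l k ≠ -1) (hk : k < l.length)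
    (he : (l.take (k + 1)).count (rtgV l k) % 2 = 0) :
    ∃ s, s < k ∧ rtgStart l s ∧ rtgPartner l s = k := by
  have hvk : l[k] = rtgV l k := (List.getD_eq_getElem _ _ hk).symm
  have hsplit : (l.take (k + 1)).count (rtgV l k) = (l.take k).count (rtgV l k) + 1 := by
    rw [List.take_add_one, List.count_append, List.getElem?_eq_getElem hk]
    simp [hvk]
  have hoddk : (l.take k).count (rtgV l k) % 2 = 1 := by omega
  have hmemk : rtgV l k ∈ l.take k := by
    rw [← List.count_pos_iff]
    omega
  obtain ⟨s, hs1, hs2, hs3⟩ := rtg_last_occ k hk.le hmemk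
  have hslen : s < l.length := by omega
  have hmid : ((l.drop (s + 1)).take (k - (s + 1))).count (rtgV l k) = 0 := by
    rw [List.count_eq_zero]
    intro hmemt
    obtain ⟨m, hm, hmv⟩ := List.mem_iff_getElem.1 hmemt
    have hmlen : m < k - (s + 1) := by simp [List.length_take, List.length_drop] at hm; omega
    rw [List.getElem_take, List.getElem_drop] at hmv
    exact hs3 (s + 1 + m) (by omega) (by omega)
      (by rw [List.getD_eq_getElem _ _ (by omega : s + 1 + m < l.length)]; exact hmv)
  have hcnts : (l.take (s + 1)).count (rtgV l k) = (l.take k).count (rtgV l k) := by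
    have hsplit2 : l.take k = l.take (s + 1) ++ (l.drop (s + 1)).take (k - (s + 1)) := by
      rw [← List.take_add]
      congr 1
      omega
    rw [hsplit2, List.count_append]
    omega
  have hvs : rtgV l s = rtgV l k := hs2
  have hdmem : rtgV l k ∈ l.drop (s + 1) := by
    refine List.mem_iff_getElem.mpr ⟨k - (s + 1), by simp [List.length_drop]; omega, ?_⟩
    rw [List.getElem_drop]
    simpa only [show s + 1 + (k - (s + 1)) = k from by omega] using hvk
  have hstart : rtgStart l s := by
    refine ⟨by rw [hvs]; exact hv, ?_, by rw [hvs]; exact hdmem⟩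
    rw [hvs, hcnts]
    exact hoddk
  refine ⟨s, hs1, hstart, ?_⟩
  have hidx : PySem.List.index? (l.drop (s + 1)) (rtgV l s) = some (k - (s + 1)) := by
    apply rtg_index?_eq_some_of (by simp [List.length_drop]; omega)
    · rw [List.getElem_drop, hvs]
      simpa only [show s + 1 + (k - (s + 1)) = k from by omega] using hvk
    · intro j hj
      rw [List.getElem_drop, hvs]
      intro hx
      apply hs3 (s + 1 + j) (by omega) (by omega)
      rw [List.getD_eq_getElem _ _ (show s + 1 + j < l.length from by omega)]
      exact hx
  unfold rtgPartner
  rw [hidx]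
  show s + 1 + (k - (s + 1)) = k
  omega

theorem rtg_findJ_none (nl : List Int) (v : Int) :
    ∀ j, (∀ j', j ≤ j' → j' < nl.length → nl.getD j' 0 ≠ v) → rtgFindJ nl v j = none := by
  suffices H : ∀ d j, nl.length - j ≤ d →
      (∀ j', j ≤ j' → j' < nl.length → nl.getD j' 0 ≠ v) → rtgFindJ nl v j = none by
    intro j h
    exact H nl.length j (by omega) h
  intro d
  induction d with
  | zero =>
    intro j hd hyp
    rw [rtgFindJ, dif_neg (by omega)]
  | succ d ih =>
    intro j hd hyp
    rw [rtgFindJ]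
    split_ifs with h1 h2
    · exact absurd h2 (hyp j le_rfl h1)
    · exact ih (j + 1) (by omega) (fun j' hj1 hj2 => hyp j' (by omega) hj2)
    · rfl

theorem rtg_findJ_some (nl : List Int) (v : Int) :
    ∀ j m, j ≤ m → m < nl.length → nl.getD m 0 = v →
      (∀ j', j ≤ j' → j' < m → nl.getD j' 0 ≠ v) → rtgFindJ nl v j = some m := by
  suffices H : ∀ d j m, nl.length - j ≤ d → j ≤ m → m < nl.length → nl.getD m 0 = v →
      (∀ j', j ≤ j' → j' < m → nl.getD j' 0 ≠ v) → rtgFindJ nl v j = some m by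
    intro j m h1 h2 h3 h4
    exact H nl.length j m (by omega) h1 h2 h3 h4
  intro d
  induction d with
  | zero =>
    intro j m hd hjm hm hv hlt
    exact absurd hm (by omega)
  | succ d ih =>
    intro j m hd hjm hm hv hlt
    rw [rtgFindJ]
    split_ifs with h1 h2
    · have hjm' : j = m := by
        by_contra hne
        exact hlt j le_rfl (by omega) h2
      rw [hjm']
    · have hjm' : j < m := by
        rcases Nat.lt_or_ge j m with h | h
        · exact h
        · exact absurd (by rw [show j = m from by omega]; exact hv) h2
      exact ih (j + 1) m (by omega) (by omega) hm hv (fun j' hj1 hj2 => hlt j' (by omega) hj2)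
    · exact absurd hm (by omega)

theorem rtg_stepB_not_start {l : List Int} {i : Nat} (h : ¬ rtgStart l i) (res : List Int) :
    rtgStepB l res i = res := by
  simp only [rtgStepB]
  split_ifs with h1 h2
  · exact absurd ⟨h1.1, h1.2, h2⟩ h
  · rfl
  · rfl

theorem rtg_stepB_start {l : List Int} {i : Nat} (h : rtgStart l i) (res : List Int) :
    rtgStepB l res i = res ++ [((rtgPartner l i : Int)) - (i : Int)] := by
  obtain ⟨hv, hodd, hmem⟩ := h
  cases h' : PySem.List.index? (l.drop (i + 1)) (rtgV l i) with
  | none => exact absurd ((PySem.List.index?_eq_none_iff _ _).mp h') (by simpa using hmem)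
  | some k0 =>
    have hpk : rtgPartner l i = i + 1 + k0 := by unfold rtgPartner; rw [h']; rfl
    simp only [rtgV] at hv hodd hmem h'
    simp only [rtgStepB]
    rw [if_pos ⟨hv, hodd⟩, if_pos hmem, h', hpk]
    have hcast : ((i + 1 + k0 : Nat) : Int) - (i : Int) = (k0 : Int) + 1 := by
      push_cast
      ring
    rw [hcast]

theorem rtg_dead_succ_of_not_start {l : List Int} {i : Nat} (h : ¬ rtgStart l i) (k : Nat) :
    rtgDead l (i + 1) k ↔ rtgDead l i k := by
  constructor
  · rintro (h1 | ⟨h2, h2'⟩ | ⟨s, hs1, hs2, hs3⟩)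
    · exact Or.inl h1
    · rcases (by omega : k < i ∨ k = i) with hc | hc
      · exact Or.inr (Or.inl ⟨h2, hc⟩)
      · exact absurd (hc ▸ h2) h
    · rcases (by omega : s < i ∨ s = i) with hc | hc
      · exact Or.inr (Or.inr ⟨s, hc, hs2, hs3⟩)
      · exact absurd (hc ▸ hs2) h
  · rintro (h1 | ⟨h2, h2'⟩ | ⟨s, hs1, hs2, hs3⟩)
    · exact Or.inl h1
    · exact Or.inr (Or.inl ⟨h2, by omega⟩)
    · exact Or.inr (Or.inr ⟨s, by omega, hs2, hs3⟩)

theorem rtg_dead_succ_of_start {l : List Int} {i k : Nat} (_hs : rtgStart l i)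
    (h1 : k ≠ i) (h2 : k ≠ rtgPartner l i) : rtgDead l (i + 1) k ↔ rtgDead l i k := by
  constructor
  · rintro (h | ⟨ha, hb⟩ | ⟨s, hsa, hsb, hsc⟩)
    · exact Or.inl h
    · exact Or.inr (Or.inl ⟨ha, by omega⟩)
    · rcases (by omega : s < i ∨ s = i) with hc | hc
      · exact Or.inr (Or.inr ⟨s, hc, hsb, hsc⟩)
      · exact absurd (hc ▸ hsc).symm h2
  · rintro (h | ⟨ha, hb⟩ | ⟨s, hsa, hsb, hsc⟩)
    · exact Or.inl h
    · exact Or.inr (Or.inl ⟨ha, by omega⟩)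
    · exact Or.inr (Or.inr ⟨s, by omega, hsb, hsc⟩)

theorem rtg_getD_set (xs : List Int) (m k : Nat) (a : Int) :
    (xs.set m a).getD k 0 = if m = k ∧ m < xs.length then a else xs.getD k 0 := by
  rcases Nat.lt_or_ge k xs.length with hk | hk
  · rw [List.getD_eq_getElem _ _ (by simpa using hk), List.getD_eq_getElem _ _ hk,
      List.getElem_set]
    split_ifs with hc1 hc2 hc3
    · rfl
    · exact absurd ⟨hc1, hc1 ▸ hk⟩ hc2
    · exact absurd hc3.1 hc1
    · rfl
  · rw [if_neg (fun hc => by omega), List.getD_eq_default _ _ (by simpa using hk),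
      List.getD_eq_default _ _ hk]

theorem rtg_step {l : List Int} {i : Nat} {st : List Int × List Int}
    (hInv : rtgInv l i st) (hi : i < l.length) : rtgInv l (i + 1) (rtgStepA st i) := by
  obtain ⟨hlen, hnl, htmp⟩ := hInv
  by_cases hs : rtgStart l i
  · -- start case: A pairs i with its partner
    have hnd : ¬ rtgDead l i i := by
      rintro (h1 | ⟨h2, h2'⟩ | ⟨s, hsi, hss, hsp⟩)
      · exact hs.1 h1
      · omega
      · have hcnt := rtg_count_partner hss
        rw [hsp] at hcnt
        have hvv : rtgV l i = rtgV l s := by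
          rw [← (rtg_partner_spec hss).2.2.1, hsp]
        rw [← hvv] at hcnt
        have := hs.2.1
        omega
    have hvi : st.1.getD i 0 = rtgV l i := (hnl i hi).2 hnd
    obtain ⟨hlt1, hlt2, hveq, hbet⟩ := rtg_partner_spec hs
    have hfind : rtgFindJ st.1 (st.1.getD i 0) (i + 1) = some (rtgPartner l i) := by
      apply rtg_findJ_some
      · omega
      · rw [hlen]; exact hlt2
      · have hndp : ¬ rtgDead l i (rtgPartner l i) := by
          rintro (h1 | ⟨h2, h2'⟩ | ⟨s, hsi, hss, hsp⟩)
          · rw [hveq] at h1; exact hs.1 h1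
          · omega
          · have := rtg_partner_inj hss hs hsp
            omega
        rw [(hnl _ hlt2).2 hndp, hvi]
        exact hveq
      · intro j' hj1 hj2
        have hj'len : j' < l.length := by omega
        rw [hvi]
        rcases Classical.em (rtgDead l i j') with hd | hd
        · rw [(hnl j' hj'len).1 hd]
          exact fun hc => hs.1 hc.symm
        · rw [(hnl j' hj'len).2 hd]
          exact hbet j' (by omega) hj2
    have hvne : st.1.getD i 0 ≠ -1 := by rw [hvi]; exact hs.1
    simp only [rtgStepA]
    rw [if_pos hvne, hfind]
    refine ⟨by simp [hlen], ?_, ?_⟩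
    · intro k hk
      have hlen1 : (st.1.set (rtgPartner l i) (-1)).length = l.length := by simp [hlen]
      constructor
      · intro hdk
        rw [rtg_getD_set, rtg_getD_set]
        by_cases hki : i = k
        · rw [if_pos ⟨hki, by omega⟩]
        · rw [if_neg (fun hc => hki hc.1)]
          by_cases hkp : rtgPartner l i = k
          · rw [if_pos ⟨hkp, by rw [hlen]; omega⟩]
          · rw [if_neg (fun hc => hkp hc.1)]
            exact (hnl k hk).1 ((rtg_dead_succ_of_start hs (fun hc => hki hc.symm)
              (fun hc => hkp hc.symm)).mp hdk)
      · intro hdk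
        have hki : k ≠ i := fun hc => hdk (by rw [hc]; exact Or.inr (Or.inl ⟨hs, by omega⟩))
        have hkp : k ≠ rtgPartner l i :=
          fun hc => hdk (by rw [hc]; exact Or.inr (Or.inr ⟨i, by omega, hs, rfl⟩))
        rw [rtg_getD_set, rtg_getD_set, if_neg (fun hc => hki hc.1.symm),
          if_neg (fun hc => hkp hc.1.symm)]
        exact (hnl k hk).2 (fun h => hdk ((rtg_dead_succ_of_start hs hki hkp).mpr h))
    · rw [List.range_succ, List.foldl_append, List.foldl_cons, List.foldl_nil, ← htmp,
        rtg_stepB_start hs]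
  · -- non-start case: A leaves the state unchanged
    have hdeq := rtg_dead_succ_of_not_start hs
    have hstep : rtgStepA st i = st := by
      by_cases hd : rtgDead l i i
      · have hm1 : st.1.getD i 0 = -1 := (hnl i hi).1 hd
        simp only [rtgStepA]
        rw [if_neg (fun hne => hne hm1)]
      · have hvi : st.1.getD i 0 = rtgV l i := (hnl i hi).2 hd
        have hvne : rtgV l i ≠ -1 := fun h => hd (Or.inl h)
        have hodd : (l.take (i + 1)).count (rtgV l i) % 2 = 1 := by
          rcases Nat.mod_two_eq_zero_or_one ((l.take (i + 1)).count (rtgV l i)) with h | h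
          · obtain ⟨s, h1, h2, h3⟩ := rtg_even_prev hvne hi h
            exact absurd (Or.inr (Or.inr ⟨s, h1, h2, h3⟩)) hd
          · exact h
        have hnomem : rtgV l i ∉ l.drop (i + 1) := fun hm => hs ⟨hvne, hodd, hm⟩
        have hfind : rtgFindJ st.1 (st.1.getD i 0) (i + 1) = none := by
          apply rtg_findJ_none
          intro j' hj1 hj2
          have hj'len : j' < l.length := by rw [hlen] at hj2; exact hj2
          rw [hvi]
          rcases Classical.em (rtgDead l i j') with hd' | hd'
          · rw [(hnl j' hj'len).1 hd']
            exact fun hc => hvne hc.symm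
          · rw [(hnl j' hj'len).2 hd']
            intro hc
            apply hnomem
            refine List.mem_iff_getElem.mpr ⟨j' - (i + 1), by simp [List.length_drop]; omega, ?_⟩
            rw [List.getElem_drop]
            simp only [show i + 1 + (j' - (i + 1)) = j' from by omega]
            rw [← List.getD_eq_getElem _ _ hj'len]
            exact hc
        simp only [rtgStepA]
        rw [if_pos (by rw [hvi]; exact hvne), hfind]
    rw [hstep]
    refine ⟨hlen, ?_, ?_⟩
    · intro k hk
      exact ⟨fun hdk => (hnl k hk).1 ((hdeq k).mp hdk),
        fun hdk => (hnl k hk).2 (fun h => hdk ((hdeq k).mpr h))⟩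
    · rw [List.range_succ, List.foldl_append, List.foldl_cons, List.foldl_nil, ← htmp,
        rtg_stepB_not_start hs]

theorem rtg_inv_all (l : List Int) : ∀ m, m ≤ l.length →
    rtgInv l m ((List.range m).foldl rtgStepA (l, [])) := by
  intro m
  induction m with
  | zero =>
    intro _
    refine ⟨rfl, ?_, rfl⟩
    intro k hk
    constructor
    · rintro (h1 | ⟨h2, h2'⟩ | ⟨s, hsi, _, _⟩)
      · exact h1
      · omega
      · omega
    · intro _; rfl
  | succ m ih =>
    intro hm
    rw [List.range_succ, List.foldl_append, List.foldl_cons, List.foldl_nil]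
    exact rtg_step (ih (by omega)) (by omega)

-- ===== VERDICT (by name: the statement is the Claim_ definition above) =====
theorem rottoredgap_spec : Claim_equal_rottoredgap := by
  intro l _
  unfold Spec_rottoredgap rottoredgap rottoredgap_alt
  exact (rtg_inv_all l l.length le_rfl).2.2
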